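-- pv_equiv track=rewrite | github.com/xansxuss/onnx_infer | module/gst_moudle.py | replace_gstStr_forPC
-- ===== SOURCE A (Python) =====
-- def replace_gstStr_forPC(gst_str):
--     gst_plugins= gst_str.split('!')
--
--     new_plugins= []
--     for plugin in gst_plugins:
--         if 'nvv4l2decoder' in plugin:#x86上沒有max-perform等變數
--             new_plugins.append('nvv4l2decoder')
--         elif 'nvv4l2h264enc' in plugin:#x86上沒有max-perform等變數
--             new_plugins.append('nvv4l2h264enc')
--         elif 'nvvidconv' in plugin:#x86上使用nvvidconvert替代
--             new_plugin= plugin.replace('nvvidconv', 'nvvideoconvert')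
--             new_plugins.append(new_plugin)
--         elif 'nv3dsink' in plugin:#顯示部份Jetson: nv3dsink, x86: nveglglessink
--             new_plugin= plugin.replace('nv3dsink', 'nveglglessink')
--             new_plugins.append(new_plugin)
--         else:
--             new_plugins.append(plugin)
--
--     new_plugins= [plugin for plugin in map(lambda x:x.strip(), new_plugins)]
--     new_gst_str= ' ! '.join(new_plugins)
--     return new_gst_str
-- ===== SOURCE B (Python) =====
-- def _fix(seg):
--     # Bare plugin names: x86 has no max-perform etc. options.
--     if 'nvv4l2decoder' in seg:
--         return 'nvv4l2decoder'
--     if 'nvv4l2h264enc' in seg: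
--         return 'nvv4l2h264enc'
--     # Substitutions; str.replace is a no-op when the marker is absent, and
--     # 'nvvidconv' takes precedence, so no fourth containment test is needed.
--     if 'nvvidconv' in seg:
--         return seg.replace('nvvidconv', 'nvvideoconvert')
--     return seg.replace('nv3dsink', 'nveglglessink')
--
-- def replace_gstStr_forPC(gst_str):
--     # Single streaming pass over the characters: flush each '!'-delimited
--     # segment through _fix/strip as it completes, instead of staged
--     # split/append/re-strip passes over whole lists.
--     pieces = []
--     seg = []
--     for ch in gst_str:
--         if ch == '!':
--             pieces.append(_fix(''.join(seg)).strip())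
--             seg = []
--         else:
--             seg.append(ch)
--     pieces.append(_fix(''.join(seg)).strip())
--     return ' ! '.join(pieces)
-- ===== Notes on version B (the rewrite author's own statement) =====
-- stated objective: alternative
-- what changed: Replaces A's staged passes (split list, four-way if/elif chain appending to a list, a second strip pass, join) with a single streaming character scan that flushes each '!'-delimited segment through a three-test fixer (the fourth containment test disappears because str.replace is a no-op when the marker is absent).
import Mathlib
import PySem

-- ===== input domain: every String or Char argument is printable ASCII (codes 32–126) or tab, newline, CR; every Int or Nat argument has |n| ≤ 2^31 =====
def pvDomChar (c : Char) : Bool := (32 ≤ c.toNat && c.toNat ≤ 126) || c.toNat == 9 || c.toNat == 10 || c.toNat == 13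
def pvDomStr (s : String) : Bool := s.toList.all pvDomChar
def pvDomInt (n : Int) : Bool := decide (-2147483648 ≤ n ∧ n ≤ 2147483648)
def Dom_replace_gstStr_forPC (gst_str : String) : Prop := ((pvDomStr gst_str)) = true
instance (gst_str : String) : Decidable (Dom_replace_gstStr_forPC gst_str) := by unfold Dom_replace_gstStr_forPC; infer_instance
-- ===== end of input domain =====

-- B replaces A's staged passes (split, four-way if/elif chain, re-strip pass, join) with one
-- streaming character scan that flushes each '!'-delimited segment through a three-test fixer (alternative).

-- ===== PORT A =====
def replace_gstStr_forPC (gst_str : String) : String :=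
  let gst_plugins := (PySem.Str.split? gst_str "!").getD []   -- sep "!" ≠ "", so split? is some
  let new_plugins := gst_plugins.foldl (fun acc plugin =>
    if PySem.Str.isIn "nvv4l2decoder" plugin then acc ++ ["nvv4l2decoder"]
    else if PySem.Str.isIn "nvv4l2h264enc" plugin then acc ++ ["nvv4l2h264enc"]
    else if PySem.Str.isIn "nvvidconv" plugin then
      acc ++ [PySem.Str.replace plugin "nvvidconv" "nvvideoconvert"]
    else if PySem.Str.isIn "nv3dsink" plugin then
      acc ++ [PySem.Str.replace plugin "nv3dsink" "nveglglessink"]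
    else acc ++ [plugin]) []
  let new_plugins := new_plugins.map PySem.Str.strip
  PySem.Str.join " ! " new_plugins

-- ===== PORT B =====
-- _fix of Source B (on the code points of one segment): two bare-name tests, then the
-- substitutions — no fourth containment test, replace of an absent marker is a no-op
def pvFix (seg : List Char) : List Char :=
  if PySem.Chars.isIn "nvv4l2decoder".toList seg then "nvv4l2decoder".toList
  else if PySem.Chars.isIn "nvv4l2h264enc".toList seg then "nvv4l2h264enc".toList
  else if PySem.Chars.isIn "nvvidconv".toList seg then
    PySem.Chars.replace seg "nvvidconv".toList "nvvideoconvert".toList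
  else PySem.Chars.replace seg "nv3dsink".toList "nveglglessink".toList

-- one step of Source B's character loop: state = (finished pieces, current segment)
def pvStep (st : List (List Char) × List Char) (c : Char) : List (List Char) × List Char :=
  if c = '!' then (st.1 ++ [PySem.Chars.strip (pvFix st.2)], [])
  else (st.1, st.2 ++ [c])

def replace_gstStr_forPC_alt (gst_str : String) : String :=
  let st := gst_str.toList.foldl pvStep ([], [])
  String.ofList (PySem.Chars.join " ! ".toList (st.1 ++ [PySem.Chars.strip (pvFix st.2)]))

-- ===== PRECONDITION & SPEC =====
def Spec_replace_gstStr_forPC (gst_str : String) (out : String) : Prop := out = replace_gstStr_forPC_alt gst_str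
instance (gst_str : String) (out : String) : Decidable (Spec_replace_gstStr_forPC gst_str out) := by unfold Spec_replace_gstStr_forPC; infer_instance

-- ===== CLAIM (what is proved, stated in full; the proofs are below) =====
def Claim_equal_replace_gstStr_forPC : Prop := ∀ (gst_str : String), Dom_replace_gstStr_forPC gst_str → Spec_replace_gstStr_forPC gst_str (replace_gstStr_forPC gst_str)

-- ===== LEMMAS AND PROOFS =====

-- A's per-segment branch chain, named so the fold can be rewritten to a map
def pvFixStr (plugin : String) : String :=
  if PySem.Str.isIn "nvv4l2decoder" plugin then "nvv4l2decoder"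
  else if PySem.Str.isIn "nvv4l2h264enc" plugin then "nvv4l2h264enc"
  else if PySem.Str.isIn "nvvidconv" plugin then
    PySem.Str.replace plugin "nvvidconv" "nvvideoconvert"
  else if PySem.Str.isIn "nv3dsink" plugin then
    PySem.Str.replace plugin "nv3dsink" "nveglglessink"
  else plugin

-- splitting into '!'-delimited segments, structurally (proof-only reference function)
def pvSegs : List Char → List (List Char)
  | [] => [[]]
  | c :: rest =>
    if c = '!' then [] :: pvSegs rest
    else (c :: (pvSegs rest).headI) :: (pvSegs rest).tail

theorem pvSegs_ne_nil (l : List Char) : pvSegs l ≠ [] := by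
  cases l with
  | nil => simp [pvSegs]
  | cons c rest => simp only [pvSegs]; split <;> simp

-- A's split primitive computes pvSegs
theorem pv_splitOn_go (fuel : Nat) :
    ∀ (l cur : List Char) (acc : List (List Char)), l.length ≤ fuel →
      PySem.Chars.splitOn.go ['!'] fuel l cur acc =
        acc.reverse ++ List.modifyHead (cur.reverse ++ ·) (pvSegs l) := by
  induction fuel with
  | zero =>
    intro l cur acc h
    have hl : l = [] := List.length_eq_zero_iff.mp (Nat.le_zero.mp h)
    subst hl
    simp [PySem.Chars.splitOn.go, pvSegs]
  | succ fuel ih =>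
    intro l cur acc h
    cases l with
    | nil => simp [PySem.Chars.splitOn.go, pvSegs]
    | cons c rest =>
      have hrest : rest.length ≤ fuel := Nat.lt_succ_iff.mp (by simpa using h)
      by_cases hc : c = '!'
      · subst hc
        have hp : List.isPrefixOf ['!'] ('!' :: rest) = true := by simp [List.isPrefixOf]
        simp only [PySem.Chars.splitOn.go, hp, if_true, List.length_cons, List.length_nil,
          List.drop_succ_cons, List.drop_zero]
        rw [ih rest [] (cur.reverse :: acc) hrest]
        rcases hs : pvSegs rest with _ | ⟨s, ss⟩
        · exact absurd hs (pvSegs_ne_nil rest)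
        · simp [pvSegs, hs, List.modifyHead]
      · have hp : List.isPrefixOf ['!'] (c :: rest) = false := by
          simp [List.isPrefixOf]
          intro h'
          exact absurd h'.symm hc
        simp only [PySem.Chars.splitOn.go, hp, Bool.false_eq_true, if_false]
        rw [ih rest (c :: cur) acc hrest]
        rcases hs : pvSegs rest with _ | ⟨s, ss⟩
        · exact absurd hs (pvSegs_ne_nil rest)
        · simp [pvSegs, hs, hc]

theorem pv_splitOn (l : List Char) :
    PySem.Chars.splitOn l ['!'] = pvSegs l := by
  unfold PySem.Chars.splitOn
  rw [pv_splitOn_go (l.length + 1) l [] [] (Nat.le_succ _)]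
  rcases hs : pvSegs l with _ | ⟨s, ss⟩
  · exact absurd hs (pvSegs_ne_nil l)
  · simp

-- replace is the identity when the pattern does not occur
theorem pv_replace_go_no_occ (old new : List Char) (fuel : Nat) :
    ∀ (l acc : List Char), ¬ old <:+: l →
      PySem.Chars.replace.go old new fuel l acc = acc.reverse ++ l := by
  induction fuel with
  | zero => intro l acc _; simp [PySem.Chars.replace.go]
  | succ fuel ih =>
    intro l acc hno
    cases l with
    | nil => simp [PySem.Chars.replace.go]
    | cons c rest =>
      have hp : List.isPrefixOf old (c :: rest) = false := by
        rw [Bool.eq_false_iff]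
        intro h
        exact hno (List.IsPrefix.isInfix (List.isPrefixOf_iff_prefix.mp h))
      simp only [PySem.Chars.replace.go, hp, Bool.false_eq_true, if_false]
      rw [ih rest (c :: acc) (fun h => hno ((List.infix_cons_iff).mpr (Or.inr h)))]
      simp

theorem pv_replace_no_occ (l old new : List Char) (h : ¬ old <:+: l) :
    PySem.Chars.replace l old new = l := by
  unfold PySem.Chars.replace
  have hold : old.isEmpty = false := by
    cases old with
    | nil => exact absurd List.nil_infix h
    | cons a t => rfl
  rw [hold]
  simp only [Bool.false_eq_true, if_false]
  simpa using pv_replace_go_no_occ old new l.length l [] h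

-- A's stripped branch chain equals B's stripped _fix, segmentwise on the code points
theorem pv_fix_seg (s : List Char) :
    (PySem.Str.strip (pvFixStr (String.ofList s))).toList = PySem.Chars.strip (pvFix s) := by
  simp only [pvFixStr, PySem.Str.isIn, PySem.Str.replace, PySem.Str.strip, String.toList_ofList,
    pvFix]
  split_ifs with h1 h2 h3 h4 <;> simp [String.toList_ofList]
  -- remaining case: A keeps the segment; B's replace of the absent 'nv3dsink' is a no-op
  rw [pv_replace_no_occ s _ _ ((PySem.Chars.isIn_eq_false_iff _ _).mp (by simpa using h4))]

-- B's character loop computes the mapped segments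
theorem pv_scan (l : List Char) :
    ∀ (P : List (List Char)) (S : List Char),
      (l.foldl pvStep (P, S)).1 ++ [PySem.Chars.strip (pvFix (l.foldl pvStep (P, S)).2)] =
        P ++ (List.modifyHead (S ++ ·) (pvSegs l)).map (fun s => PySem.Chars.strip (pvFix s)) := by
  induction l with
  | nil => intro P S; simp [pvSegs]
  | cons c rest ih =>
    intro P S
    rcases hs : pvSegs rest with _ | ⟨s, ss⟩
    · exact absurd hs (pvSegs_ne_nil rest)
    by_cases hc : c = '!'
    · subst hc
      simp only [List.foldl_cons, pvStep, reduceIte]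
      rw [ih (P ++ [PySem.Chars.strip (pvFix S)]) []]
      simp [pvSegs, hs]
    · simp only [List.foldl_cons, pvStep, if_neg hc]
      rw [ih P (S ++ [c])]
      simp [pvSegs, hs, hc]

-- ===== VERDICT (by name: the statement is the Claim_ definition above) =====
theorem replace_gstStr_forPC_spec : Claim_equal_replace_gstStr_forPC := by
  intro gst_str _
  unfold Spec_replace_gstStr_forPC
  show replace_gstStr_forPC gst_str = replace_gstStr_forPC_alt gst_str
  have hA : replace_gstStr_forPC gst_str =
      PySem.Str.join " ! " ((((PySem.Str.split? gst_str "!").getD []).foldl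
        (fun acc plugin => acc ++ [pvFixStr plugin]) []).map PySem.Str.strip) := by
    unfold replace_gstStr_forPC
    rw [show (fun (acc : List String) (plugin : String) =>
        if PySem.Str.isIn "nvv4l2decoder" plugin then acc ++ ["nvv4l2decoder"]
        else if PySem.Str.isIn "nvv4l2h264enc" plugin then acc ++ ["nvv4l2h264enc"]
        else if PySem.Str.isIn "nvvidconv" plugin then
          acc ++ [PySem.Str.replace plugin "nvvidconv" "nvvideoconvert"]
        else if PySem.Str.isIn "nv3dsink" plugin then
          acc ++ [PySem.Str.replace plugin "nv3dsink" "nveglglessink"]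
        else acc ++ [plugin]) = (fun acc plugin => acc ++ [pvFixStr plugin])
      from by
        funext acc plugin
        simp only [pvFixStr]
        split_ifs <;> rfl]
  have hB : replace_gstStr_forPC_alt gst_str =
      String.ofList (PySem.Chars.join " ! ".toList
        ((gst_str.toList.foldl pvStep ([], [])).1 ++
          [PySem.Chars.strip (pvFix (gst_str.toList.foldl pvStep ([], [])).2)])) := rfl
  have hsplit : PySem.Str.split? gst_str "!" =
      some ((pvSegs gst_str.toList).map String.ofList) := by
    simp [PySem.Str.split?, PySem.Chars.split?, pv_splitOn]
  rw [hA, hB, pv_scan gst_str.toList [] [], hsplit]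
  rcases hs : pvSegs gst_str.toList with _ | ⟨s, ss⟩
  · exact absurd hs (pvSegs_ne_nil _)
  · simp only [Option.getD_some, PySem.List.foldl_append_singleton_eq_map, List.nil_append,
      List.map_map, List.modifyHead, PySem.Str.join]
    rw [List.map_congr_left (l := s :: ss)
      (f := String.toList ∘ PySem.Str.strip ∘ pvFixStr ∘ String.ofList)
      (g := fun t => PySem.Chars.strip (pvFix t))
      (fun t _ => by simpa using pv_fix_seg t)]
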